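-- pv_equiv track=rewrite | github.com/any-nickname/a2as-demo | ui/formatters.py | format_emails_list
-- ===== SOURCE A (Python) =====
-- def format_emails_list(emails, max_body_length=100):
--     """Format emails for display"""
--     if not emails:
--         return "No emails"
--
--     def escape_markdown(text):
--         """Escape special Markdown characters and newlines"""
--         if not text:
--             return text
--         # Заменяем переносы строк на пробелы, чтобы избежать проблем с Markdown списками
--         text = text.replace('\n', ' ')
--         # Экранируем специальные символы Markdown
--         special_chars = ['\\', '`', '*', '_', '{', '}', '[', ']', '(', ')', '#', '+', '-', '.', '!', '|']
--         for char in special_chars: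
--             text = text.replace(char, '\\' + char)
--         return text
--
--     result = []
--     for i, email in enumerate(emails, 1):
--         body = email.get('body', '')
--
--         # Экранируем все поля перед выводом
--         from_addr = escape_markdown(email.get('from', 'N/A'))
--         to_addr = escape_markdown(email.get('to', 'N/A'))
--         subject = escape_markdown(email.get('subject', 'N/A'))
--         body = escape_markdown(body)
--
--         result.append(f"**[Email {i}]**<br>"
--                      f"&nbsp;&nbsp;&nbsp;&nbsp;From:&nbsp;&nbsp;&nbsp;&nbsp; {from_addr}<br>"
--                      f"&nbsp;&nbsp;&nbsp;&nbsp;To:&nbsp;&nbsp;&nbsp;&nbsp;&nbsp;&nbsp;&nbsp;&nbsp;&nbsp;&nbsp; {to_addr}<br>"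
--                      f"&nbsp;&nbsp;&nbsp;&nbsp;Subject: {subject}<br>"
--                      f"<div style='max-height: 75px; overflow: overlay;'>&nbsp;&nbsp;&nbsp;&nbsp;Body:&nbsp;&nbsp;&nbsp;&nbsp; {body}</div><br>"
--                      f"{'─' * 50}")
--
--     return "\n\n".join(result)
-- ===== SOURCE B (Python) =====
-- def format_emails_list(emails, max_body_length=100):
--     """Format emails for display"""
--     if not emails:
--         return "No emails"
--
--     SPECIALS = frozenset('\\`*_{}[]()#+-.!|')
--
--     def esc(text):
--         # single left-to-right scan: newline -> space, specials -> backslash-escaped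
--         return ''.join(' ' if c == '\n' else '\\' + c if c in SPECIALS else c
--                        for c in text)
--
--     # declarative field template: (literal label, dict key, default, suffix)
--     FIELDS = [
--         ("&nbsp;&nbsp;&nbsp;&nbsp;From:&nbsp;&nbsp;&nbsp;&nbsp; ", 'from', 'N/A', "<br>"),
--         ("&nbsp;&nbsp;&nbsp;&nbsp;To:&nbsp;&nbsp;&nbsp;&nbsp;&nbsp;&nbsp;&nbsp;&nbsp;&nbsp;&nbsp; ", 'to', 'N/A', "<br>"),
--         ("&nbsp;&nbsp;&nbsp;&nbsp;Subject: ", 'subject', 'N/A', "<br>"),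
--         ("<div style='max-height: 75px; overflow: overlay;'>&nbsp;&nbsp;&nbsp;&nbsp;Body:&nbsp;&nbsp;&nbsp;&nbsp; ", 'body', '', "</div><br>"),
--     ]
--
--     def rows(i, rest):
--         # recursion over the email list instead of an enumerate loop
--         if not rest:
--             return []
--         e = rest[0]
--         parts = ["**[Email %d]**<br>" % i]
--         for label, key, default, suffix in FIELDS:
--             parts.append(label + esc(e.get(key, default)) + suffix)
--         parts.append('─' * 50)
--         return [''.join(parts)] + rows(i + 1, rest[1:])
--
--     return "\n\n".join(rows(1, emails))
-- ===== Notes on version B (the rewrite author's own statement) =====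
-- stated objective: alternative
-- what changed: Escaping becomes a single hand-written left-to-right scan with a per-character conditional (set membership) instead of 16 sequential full-string replace passes, the row layout is driven by a declarative field-template table instead of one inline f-string, and the rows are produced by recursion over the list instead of an enumerate loop.
import Mathlib
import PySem

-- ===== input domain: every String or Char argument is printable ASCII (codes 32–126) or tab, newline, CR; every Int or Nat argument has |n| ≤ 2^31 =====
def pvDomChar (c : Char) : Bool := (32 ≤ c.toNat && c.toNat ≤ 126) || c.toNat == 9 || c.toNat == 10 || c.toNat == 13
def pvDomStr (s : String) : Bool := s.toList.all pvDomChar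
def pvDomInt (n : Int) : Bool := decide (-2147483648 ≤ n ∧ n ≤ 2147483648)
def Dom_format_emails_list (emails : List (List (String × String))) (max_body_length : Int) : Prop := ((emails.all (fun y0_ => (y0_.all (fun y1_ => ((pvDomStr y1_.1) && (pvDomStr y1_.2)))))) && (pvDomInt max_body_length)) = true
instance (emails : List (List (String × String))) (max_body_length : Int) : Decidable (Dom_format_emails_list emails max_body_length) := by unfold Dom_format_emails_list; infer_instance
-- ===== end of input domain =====

-- B escapes each field in one hand-written character scan (set membership + conditional) instead
-- of A's 16 sequential full-string replace passes, builds rows from a declarative field-template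
-- table instead of an inline f-string, and recurses over the list instead of an enumerate loop
-- (objective: alternative); the return value is proved identical on all inputs.

-- ===== PORT A =====

-- A's special_chars list, in A's order
def pvSpecialsA : List String :=
  ["\\", "`", "*", "_", "{", "}", "[", "]", "(", ")", "#", "+", "-", ".", "!", "|"]

-- A's escape_markdown: newline→space, then one full replace pass per special char
def pvEscapeA (text : String) : String :=
  if text = "" then text
  else
    let t := PySem.Str.replace text "\n" " "
    pvSpecialsA.foldl (fun t ch => PySem.Str.replace t ch ("\\" ++ ch)) t

-- one f-string row of A's result list
def pvRowA (i : Int) (email : List (String × String)) : String :=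
  let from_addr := pvEscapeA (PySem.Dict.getD (PySem.Dict.mk email) "from" "N/A")
  let to_addr := pvEscapeA (PySem.Dict.getD (PySem.Dict.mk email) "to" "N/A")
  let subject := pvEscapeA (PySem.Dict.getD (PySem.Dict.mk email) "subject" "N/A")
  let body := pvEscapeA (PySem.Dict.getD (PySem.Dict.mk email) "body" "")
  "**[Email " ++ PySem.Int.toStr i ++ "]**<br>" ++
    "&nbsp;&nbsp;&nbsp;&nbsp;From:&nbsp;&nbsp;&nbsp;&nbsp; " ++ from_addr ++ "<br>" ++
    "&nbsp;&nbsp;&nbsp;&nbsp;To:&nbsp;&nbsp;&nbsp;&nbsp;&nbsp;&nbsp;&nbsp;&nbsp;&nbsp;&nbsp; " ++ to_addr ++ "<br>" ++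
    "&nbsp;&nbsp;&nbsp;&nbsp;Subject: " ++ subject ++ "<br>" ++
    "<div style='max-height: 75px; overflow: overlay;'>&nbsp;&nbsp;&nbsp;&nbsp;Body:&nbsp;&nbsp;&nbsp;&nbsp; " ++ body ++ "</div><br>" ++
    String.ofList (List.replicate 50 '─')

-- "for i, email in enumerate(emails, 1): result.append(…)"
def pvLoopA : Int → List (List (String × String)) → List String
  | _, [] => []
  | i, e :: rest => pvRowA i e :: pvLoopA (i + 1) rest

def format_emails_list (emails : List (List (String × String))) (max_body_length : Int) : String :=
  if emails = [] then "No emails"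
  else PySem.Str.join "\n\n" (pvLoopA 1 emails)

-- ===== PORT B =====

-- B's SPECIALS set (a frozenset of the distinct special characters)
def pvSpecialsB : PySem.Set Char := PySem.Set.ofList "\\`*_{}[]()#+-.!|".toList

-- the per-character conditional of B's single scan
def pvEscCharB (c : Char) : List Char :=
  if c = '\n' then [' '] else if pvSpecialsB.contains c then ['\\', c] else [c]

-- esc: one left-to-right scan over the characters, joined back to a string
def pvEscB (text : String) : String :=
  String.ofList (text.toList.flatMap pvEscCharB)

-- B's declarative field template: (label, key, default, suffix)
def pvFieldsB : List (String × String × String × String) :=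
  [("&nbsp;&nbsp;&nbsp;&nbsp;From:&nbsp;&nbsp;&nbsp;&nbsp; ", "from", "N/A", "<br>"),
   ("&nbsp;&nbsp;&nbsp;&nbsp;To:&nbsp;&nbsp;&nbsp;&nbsp;&nbsp;&nbsp;&nbsp;&nbsp;&nbsp;&nbsp; ", "to", "N/A", "<br>"),
   ("&nbsp;&nbsp;&nbsp;&nbsp;Subject: ", "subject", "N/A", "<br>"),
   ("<div style='max-height: 75px; overflow: overlay;'>&nbsp;&nbsp;&nbsp;&nbsp;Body:&nbsp;&nbsp;&nbsp;&nbsp; ", "body", "", "</div><br>")]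

-- one row: header part, then the template-driven parts loop, then the dashes; joined
def pvRowB (i : Int) (email : List (String × String)) : String :=
  let parts :=
    pvFieldsB.foldl
      (fun ps f => ps ++ [f.1 ++ pvEscB (PySem.Dict.getD (PySem.Dict.mk email) f.2.1 f.2.2.1) ++ f.2.2.2])
      ["**[Email " ++ PySem.Int.toStr i ++ "]**<br>"]
  PySem.Str.join "" (parts ++ [String.ofList (List.replicate 50 '─')])

-- rows(i, rest): recursion over the email list
def pvRowsB : Int → List (List (String × String)) → List String
  | _, [] => []
  | i, e :: rest => pvRowB i e :: pvRowsB (i + 1) rest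

def format_emails_list_alt (emails : List (List (String × String))) (max_body_length : Int) : String :=
  if emails = [] then "No emails"
  else PySem.Str.join "\n\n" (pvRowsB 1 emails)

-- ===== PRECONDITION & SPEC =====
def Spec_format_emails_list (emails : List (List (String × String))) (max_body_length : Int) (out : String) : Prop := out = format_emails_list_alt emails max_body_length
instance (emails : List (List (String × String))) (max_body_length : Int) (out : String) : Decidable (Spec_format_emails_list emails max_body_length out) := by unfold Spec_format_emails_list; infer_instance

-- ===== CLAIM =====
def Claim_equal_format_emails_list : Prop := ∀ (emails : List (List (String × String))) (max_body_length : Int), Dom_format_emails_list emails max_body_length → Spec_format_emails_list emails max_body_length (format_emails_list emails max_body_length)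

-- ===== LEMMAS AND PROOFS =====

-- replacing a single-character pattern is a character-wise flatMap
theorem pv_go_single (c : Char) (r : List Char) :
    ∀ (l : List Char) (fuel : Nat) (acc : List Char), l.length ≤ fuel →
      PySem.Chars.replace.go [c] r fuel l acc =
        acc.reverse ++ l.flatMap (fun x => if x = c then r else [x]) := by
  intro l
  induction l with
  | nil =>
    intro fuel acc _
    cases fuel <;> simp [PySem.Chars.replace.go]
  | cons x t ih =>
    intro fuel acc hle
    cases fuel with
    | zero => simp at hle
    | succ n =>
      simp only [PySem.Chars.replace.go]
      by_cases hx : x = c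
      · subst hx
        have hpre : [x].isPrefixOf (x :: t) = true := by simp [List.isPrefixOf]
        rw [if_pos hpre]
        simp only [List.length_cons, List.length_nil, List.drop_succ_cons, List.drop_zero]
        rw [ih n (r.reverse ++ acc) (by simp at hle ⊢; omega)]
        simp
      · have hpre : ¬ ([c].isPrefixOf (x :: t) = true) := by
          simp [List.isPrefixOf]; intro h; exact absurd h.symm hx
        rw [if_neg hpre, ih n (x :: acc) (by simp at hle ⊢; omega)]
        simp [hx]

theorem pv_replace_single (l : List Char) (c : Char) (r : List Char) :
    PySem.Chars.replace l [c] r = l.flatMap (fun x => if x = c then r else [x]) := by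
  simp only [PySem.Chars.replace, List.isEmpty_cons, Bool.false_eq_true, if_false]
  exact pv_go_single c r l l.length [] (le_refl _)

-- the character-wise form of A's whole 17-pass escape chain
def pvEsc (l : List Char) : List Char :=
  ((((((((((((((((l.flatMap (fun x => if x = '\n' then [' '] else [x])).flatMap (fun x => if x = '\\' then ['\\', '\\'] else [x])).flatMap (fun x => if x = '`' then ['\\', '`'] else [x])).flatMap (fun x => if x = '*' then ['\\', '*'] else [x])).flatMap (fun x => if x = '_' then ['\\', '_'] else [x])).flatMap (fun x => if x = '{' then ['\\', '{'] else [x])).flatMap (fun x => if x = '}' then ['\\', '}'] else [x])).flatMap (fun x => if x = '[' then ['\\', '['] else [x])).flatMap (fun x => if x = ']' then ['\\', ']'] else [x])).flatMap (fun x => if x = '(' then ['\\', '('] else [x])).flatMap (fun x => if x = ')' then ['\\', ')'] else [x])).flatMap (fun x => if x = '#' then ['\\', '#'] else [x])).flatMap (fun x => if x = '+' then ['\\', '+'] else [x])).flatMap (fun x => if x = '-' then ['\\', '-'] else [x])).flatMap (fun x => if x = '.' then ['\\', '.'] else [x])).flatMap (fun x => if x = '!' then ['\\', '!'] else [x])).flatMap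 (fun x => if x = '|' then ['\\', '|'] else [x])

theorem pv_esc_append (a b : List Char) : pvEsc (a ++ b) = pvEsc a ++ pvEsc b := by
  simp only [pvEsc, List.flatMap_append]

theorem pv_esc_flatMap (l : List Char) : pvEsc l = l.flatMap (fun x => pvEsc [x]) := by
  induction l with
  | nil => decide
  | cons x t ih =>
    rw [show x :: t = [x] ++ t from rfl, pv_esc_append, ih]
    simp

theorem pv_chain (l : List Char) :
    PySem.Chars.replace (PySem.Chars.replace (PySem.Chars.replace (PySem.Chars.replace (PySem.Chars.replace (PySem.Chars.replace (PySem.Chars.replace (PySem.Chars.replace (PySem.Chars.replace (PySem.Chars.replace (PySem.Chars.replace (PySem.Chars.replace (PySem.Chars.replace (PySem.Chars.replace (PySem.Chars.replace (PySem.Chars.replace (PySem.Chars.replace l ['\n'] [' ']) ['\\'] ['\\', '\\']) ['`'] ['\\', '`']) ['*'] ['\\', '*']) ['_'] ['\\', '_']) ['{'] ['\\', '{']) ['}'] ['\\', '}']) ['['] ['\\', '[']) [']'] ['\\', ']']) ['('] ['\\', '(']) [')'] ['\\', ')']) ['#'] ['\\', '#']) ['+'] ['\\', '+']) ['-'] ['\\',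 '-']) ['.'] ['\\', '.']) ['!'] ['\\', '!']) ['|'] ['\\', '|']
    = pvEsc l := by
  unfold pvEsc
  simp only [pv_replace_single]

-- per character, A's chain does exactly B's conditional
theorem pv_escChar_eq (x : Char) : pvEsc [x] = pvEscCharB x := by
  by_cases hx : x ∈ ['\n', '\\', '`', '*', '_', '{', '}', '[', ']', '(', ')', '#', '+', '-', '.', '!', '|']
  · fin_cases hx <;> decide
  · simp only [List.mem_cons, List.not_mem_nil, or_false, not_or] at hx
    obtain ⟨h0, h1, h2, h3, h4, h5, h6, h7, h8, h9, h10, h11, h12, h13, h14, h15, h16⟩ := hx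
    have hmem : x ∉ pvSpecialsB := by
      rw [show pvSpecialsB = ['\\', '`', '*', '_', '{', '}', '[', ']', '(', ')', '#', '+', '-', '.', '!', '|'] from by decide]
      simp [h1, h2, h3, h4, h5, h6, h7, h8, h9, h10, h11, h12, h13, h14, h15, h16]
    simp [pvEsc, pvEscCharB, h0, h1, h2, h3, h4, h5, h6, h7, h8, h9, h10, h11, h12, h13, h14, h15, h16, hmem]

-- A's escape equals B's escape
theorem pv_escape_eq (text : String) : pvEscapeA text = pvEscB text := by
  unfold pvEscapeA pvEscB
  by_cases h : text = ""
  · simp [h]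
  · rw [if_neg h]
    apply String.toList_inj.mp
    rw [String.toList_ofList]
    simp only [pvSpecialsA, List.foldl_cons, List.foldl_nil, PySem.Str.toList_replace,
      String.toList_append,
      show ("\n" : String).toList = ['\n'] from by decide,
      show (" " : String).toList = [' '] from by decide,
      show ("\\" : String).toList = ['\\'] from by decide,
      show ("`" : String).toList = ['`'] from by decide,
      show ("*" : String).toList = ['*'] from by decide,
      show ("_" : String).toList = ['_'] from by decide,
      show ("{" : String).toList = ['{'] from by decide,
      show ("}" : String).toList = ['}'] from by decide,
      show ("[" : String).toList = ['['] from by decide,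
      show ("]" : String).toList = [']'] from by decide,
      show ("(" : String).toList = ['('] from by decide,
      show (")" : String).toList = [')'] from by decide,
      show ("#" : String).toList = ['#'] from by decide,
      show ("+" : String).toList = ['+'] from by decide,
      show ("-" : String).toList = ['-'] from by decide,
      show ("." : String).toList = ['.'] from by decide,
      show ("!" : String).toList = ['!'] from by decide,
      show ("|" : String).toList = ['|'] from by decide,
      List.cons_append, List.nil_append]
    rw [pv_chain, pv_esc_flatMap]
    exact List.flatMap_congr (fun x _ => pv_escChar_eq x)

theorem pv_intersperse_nil_flatten (parts : List (List Char)) :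
    (List.intersperse ([] : List Char) parts).flatten = parts.flatten := by
  induction parts with
  | nil => rfl
  | cons a l ih => cases l <;> simp_all

theorem pv_row_eq (i : Int) (email : List (String × String)) :
    pvRowA i email = pvRowB i email := by
  unfold pvRowA pvRowB
  simp only [pvFieldsB, List.foldl_cons, List.foldl_nil, List.append_assoc, List.cons_append,
    List.nil_append]
  apply String.toList_inj.mp
  simp only [pv_escape_eq, PySem.Str.toList_join, PySem.Chars.join, List.intercalate,
    show ("" : String).toList = [] from by decide, List.map_cons, List.map_nil,
    pv_intersperse_nil_flatten, List.flatten, String.toList_append]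
  simp only [List.append_eq, List.append_nil, List.append_assoc]

theorem pv_loop_eq (emails : List (List (String × String))) :
    ∀ (k : Int), pvLoopA k emails = pvRowsB k emails := by
  induction emails with
  | nil => intro k; rfl
  | cons e rest ih =>
    intro k
    rw [pvLoopA, pvRowsB, pv_row_eq, ih (k + 1)]

-- ===== VERDICT =====
theorem format_emails_list_spec : Claim_equal_format_emails_list := by
  intro emails max_body_length _
  unfold Spec_format_emails_list format_emails_list format_emails_list_alt
  by_cases h : emails = []
  · rw [if_pos h, if_pos h]
  · rw [if_neg h, if_neg h, pv_loop_eq emails 1]
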